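-- pv_equiv track=rewrite | github.com/HugoPhi/autoFlex | website/scripts/run_config_search_nginx_from_zip.py | closures
-- ===== SOURCE A (Python) =====
-- from typing import Any, Callable, Dict, List, Set, Tuple
--
-- def leq(a: Dict[str, int], b: Dict[str, int], keys: List[str]) -> bool:
--     return all(a.get(k, 0) <= b.get(k, 0) for k in keys)
--
-- def closures(nodes: List[str], vectors: Dict[str, Dict[str, int]], keys: List[str]) -> Tuple[Dict[str, Set[str]], Dict[str, Set[str]]]:
--     anc: Dict[str, Set[str]] = {n: set() for n in nodes}
--     desc: Dict[str, Set[str]] = {n: set() for n in nodes}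
--     for a in nodes:
--         for b in nodes:
--             if leq(vectors[a], vectors[b], keys):
--                 anc[b].add(a)
--                 desc[a].add(b)
--     return anc, desc
-- ===== SOURCE B (Python) =====
-- from typing import Dict, List, Set, Tuple
--
-- def closures(nodes: List[str], vectors: Dict[str, Dict[str, int]], keys: List[str]) -> Tuple[Dict[str, Set[str]], Dict[str, Set[str]]]:
--     # Key-major refinement: start each closure set from all nodes and narrow it one key
--     # at a time by that key's coordinate comparison; no pairwise leq() test anywhere.
--     desc: Dict[str, Set[str]] = {}
--     for a in nodes:
--         va = vectors[a]
--         cand = list(nodes)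
--         for k in keys:
--             x = va.get(k, 0)
--             cand = [b for b in cand if x <= vectors[b].get(k, 0)]
--         desc[a] = set(cand)
--     anc: Dict[str, Set[str]] = {}
--     for b in nodes:
--         vb = vectors[b]
--         cand = list(nodes)
--         for k in keys:
--             y = vb.get(k, 0)
--             cand = [a for a in cand if vectors[a].get(k, 0) <= y]
--         anc[b] = set(cand)
--     return anc, desc
-- ===== Notes on version B (the rewrite author's own statement) =====
-- stated objective: alternative
-- what changed: A runs one pair-major double loop testing the full key-wise leq predicate per pair and incrementally .add()s into pre-initialized tables; B never calls leq: for each node it starts from the whole node list and refines it key by key (per-key coordinate filtering, intersection-style), assigning each finished set at once, and computes anc and desc as two independent such passes.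
import Mathlib
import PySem

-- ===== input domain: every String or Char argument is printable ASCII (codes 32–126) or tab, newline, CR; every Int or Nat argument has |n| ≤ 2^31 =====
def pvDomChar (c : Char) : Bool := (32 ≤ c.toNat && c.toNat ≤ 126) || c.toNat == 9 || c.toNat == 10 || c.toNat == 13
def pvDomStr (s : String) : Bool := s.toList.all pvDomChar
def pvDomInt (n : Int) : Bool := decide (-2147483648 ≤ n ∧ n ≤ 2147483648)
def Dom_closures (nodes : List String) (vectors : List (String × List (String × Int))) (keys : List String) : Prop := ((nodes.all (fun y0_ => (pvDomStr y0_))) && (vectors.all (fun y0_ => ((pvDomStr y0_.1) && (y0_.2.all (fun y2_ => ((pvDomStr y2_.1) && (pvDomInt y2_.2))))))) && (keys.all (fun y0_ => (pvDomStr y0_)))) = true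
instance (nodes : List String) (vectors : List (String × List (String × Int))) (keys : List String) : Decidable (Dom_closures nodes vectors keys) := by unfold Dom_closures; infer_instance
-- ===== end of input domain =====

-- A tests the full key-wise leq predicate per ordered pair and .add()s into pre-initialized
-- tables; B never tests pairs: per node it refines the whole node list key by key and assigns
-- each finished set at once, with anc and desc built by independent passes (objective: alternative).

-- shared plumbing: the Dict view of `vectors` and the `vectors[n]` lookup both Pythons perform
def pvVd (vectors : List (String × List (String × Int))) : PySem.Dict String (PySem.Dict String Int) :=
  PySem.Dict.ofList (vectors.map (fun p => (p.1, PySem.Dict.ofList p.2)))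

-- vectors[n]: total only under Pre_closures (KeyError otherwise); exact wherever Python returns
def pvVec (vectors : List (String × List (String × Int))) (n : String) : PySem.Dict String Int :=
  (pvVd vectors).getD n PySem.Dict.empty

-- ===== PORT A =====
-- the Python module-level `leq`
def pyLeq (a b : PySem.Dict String Int) (keys : List String) : Bool :=
  keys.all (fun k => decide (a.getD k 0 ≤ b.getD k 0))

def pvF (vectors : List (String × List (String × Int))) (keys : List String) (a b : String) : Bool :=
  pyLeq (pvVec vectors a) (pvVec vectors b) keys

def pvInit (nodes : List String) : PySem.Dict String (PySem.Set String) :=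
  nodes.foldl (fun d n => d.insert n PySem.Set.empty) PySem.Dict.empty

def closures (nodes : List String) (vectors : List (String × List (String × Int))) (keys : List String) : (List (String × List String)) × (List (String × List String)) :=
  let anc0 := pvInit nodes
  let desc0 := pvInit nodes
  let r :=
    nodes.foldl (fun p a =>
      nodes.foldl (fun p b =>
        if pvF vectors keys a b then
          (p.1.modify b PySem.Set.empty (fun s => PySem.Set.add s a),
           p.2.modify a PySem.Set.empty (fun s => PySem.Set.add s b))
        else p) p) (anc0, desc0)
  (r.1.items, r.2.items)

-- ===== PORT B =====
-- Source B: per node, start from list(nodes) and filter it once per key; then one dict assignment.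
-- `set(cand)` → PySem.Set.ofList cand (first-occurrence dedup, exact).
def closures_alt (nodes : List String) (vectors : List (String × List (String × Int))) (keys : List String) : (List (String × List String)) × (List (String × List String)) :=
  let desc :=
    nodes.foldl (fun d a =>
      let va := pvVec vectors a
      let cand := keys.foldl (fun cand k =>
        let x := va.getD k 0
        cand.filter (fun b => decide (x ≤ (pvVec vectors b).getD k 0))) nodes
      d.insert a (PySem.Set.ofList cand)) PySem.Dict.empty
  let anc :=
    nodes.foldl (fun d b =>
      let vb := pvVec vectors b
      let cand := keys.foldl (fun cand k =>
        let y := vb.getD k 0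
        cand.filter (fun a => decide ((pvVec vectors a).getD k 0 ≤ y))) nodes
      d.insert b (PySem.Set.ofList cand)) PySem.Dict.empty
  (anc.items, desc.items)

-- ===== PRECONDITION & SPEC =====
-- Pre_ excludes exactly the inputs where Python A raises KeyError (a node missing from vectors).
def Pre_closures (nodes : List String) (vectors : List (String × List (String × Int))) (keys : List String) : Prop :=
  ∀ n ∈ nodes, n ∈ vectors.map Prod.fst
instance (nodes : List String) (vectors : List (String × List (String × Int))) (keys : List String) : Decidable (Pre_closures nodes vectors keys) := by unfold Pre_closures; infer_instance
def pvWitness_closures : List String × (List (String × List (String × Int))) × List String :=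
  (["a", "b"], [("a", [("x", 1)]), ("b", [("x", 2)])], ["x"])
def Spec_closures (nodes : List String) (vectors : List (String × List (String × Int))) (keys : List String) (out : (List (String × List String)) × (List (String × List String))) : Prop := out = closures_alt nodes vectors keys
instance (nodes : List String) (vectors : List (String × List (String × Int))) (keys : List String) (out : (List (String × List String)) × (List (String × List String))) : Decidable (Spec_closures nodes vectors keys out) := by unfold Spec_closures; infer_instance

-- ===== CLAIM (what is proved, stated in full; the proofs are below) =====
def Claim_equal_closures : Prop := ∀ (nodes : List String) (vectors : List (String × List (String × Int))) (keys : List String), Dom_closures nodes vectors keys → Pre_closures nodes vectors keys → Spec_closures nodes vectors keys (closures nodes vectors keys)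

-- ===== LEMMAS AND PROOFS =====

theorem set_update_absorb : ∀ (t : List String) (s : PySem.Set String),
    (∀ x ∈ t, x ∈ s) → PySem.Set.update s t = s := by
  intro t
  induction t with
  | nil => intro s _; rfl
  | cons x t ih =>
      intro s h
      rw [PySem.Set.update_cons, PySem.Set.add_of_mem (h x (by simp))]
      exact ih s (fun y hy => h y (by simp [hy]))

-- splitting A's pair-accumulator double loop into two independent double loops
theorem split_inner (f : String → String → Bool) (a : String) :
    ∀ (l : List String) (p : PySem.Dict String (PySem.Set String) × PySem.Dict String (PySem.Set String)),
      (l.foldl (fun p b =>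
        if f a b then
          (p.1.modify b PySem.Set.empty (fun s => PySem.Set.add s a),
           p.2.modify a PySem.Set.empty (fun s => PySem.Set.add s b))
        else p) p)
      = (l.foldl (fun d b => if f a b then d.modify b PySem.Set.empty (fun s => PySem.Set.add s a) else d) p.1,
         l.foldl (fun d b => if f a b then d.modify a PySem.Set.empty (fun s => PySem.Set.add s b) else d) p.2) := by
  intro l
  induction l with
  | nil => intro p; rfl
  | cons b l ih =>
      intro p
      simp only [List.foldl_cons]
      by_cases hb : f a b
      · simp only [hb, if_true]; exact ih _
      · simp only [hb]; exact ih _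

theorem split_outer (f : String → String → Bool) (l : List String) :
    ∀ (L : List String) (p : PySem.Dict String (PySem.Set String) × PySem.Dict String (PySem.Set String)),
      (L.foldl (fun p a =>
        l.foldl (fun p b =>
          if f a b then
            (p.1.modify b PySem.Set.empty (fun s => PySem.Set.add s a),
             p.2.modify a PySem.Set.empty (fun s => PySem.Set.add s b))
          else p) p) p)
      = (L.foldl (fun d a => l.foldl (fun d b => if f a b then d.modify b PySem.Set.empty (fun s => PySem.Set.add s a) else d) d) p.1,
         L.foldl (fun d a => l.foldl (fun d b => if f a b then d.modify a PySem.Set.empty (fun s => PySem.Set.add s b) else d) d) p.2) := by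
  intro L
  induction L with
  | nil => intro p; rfl
  | cons a L ih =>
      intro p
      simp only [List.foldl_cons]
      rw [split_inner f a l p]
      exact ih _

-- value view of a fold of `modify b (add a)` over a list of keys
theorem getD_foldl_modify_add (a : String) :
    ∀ (S : List String) (d : PySem.Dict String (PySem.Set String)) (k : String),
      (S.foldl (fun d b => d.modify b PySem.Set.empty (fun s => PySem.Set.add s a)) d).getD k PySem.Set.empty
      = if k ∈ S then PySem.Set.add (d.getD k PySem.Set.empty) a else d.getD k PySem.Set.empty := by
  intro S
  induction S with
  | nil => intro d k; simp
  | cons b S ih =>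
      intro d k
      simp only [List.foldl_cons]
      rw [ih]
      by_cases hkb : k = b
      · subst hkb
        rw [PySem.Dict.getD_modify_self]
        by_cases hkS : k ∈ S
        · simp [hkS]
        · simp [hkS]
      · rw [PySem.Dict.getD_modify_of_ne _ _ _ hkb]
        simp [List.mem_cons, hkb]

-- desc inner loop: value at the fixed key a
theorem getD_desc_inner_self (f : String → String → Bool) (a : String) :
    ∀ (l : List String) (d : PySem.Dict String (PySem.Set String)),
      (l.foldl (fun d b => if f a b then d.modify a PySem.Set.empty (fun s => PySem.Set.add s b) else d) d).getD a PySem.Set.empty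
      = PySem.Set.update (d.getD a PySem.Set.empty) (l.filter (f a)) := by
  intro l
  induction l with
  | nil => intro d; simp [PySem.Set.update_nil]
  | cons b l ih =>
      intro d
      simp only [List.foldl_cons, List.filter_cons]
      by_cases hb : f a b
      · simp only [hb, if_true]
        rw [ih, PySem.Dict.getD_modify_self, PySem.Set.update_cons]
      · simp only [hb, Bool.false_eq_true, if_false]
        rw [ih]

theorem getD_desc_inner_other (f : String → String → Bool) (a k : String) (hk : k ≠ a) :
    ∀ (l : List String) (d : PySem.Dict String (PySem.Set String)),
      (l.foldl (fun d b => if f a b then d.modify a PySem.Set.empty (fun s => PySem.Set.add s b) else d) d).getD k PySem.Set.empty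
      = d.getD k PySem.Set.empty := by
  intro l
  induction l with
  | nil => intro d; rfl
  | cons b l ih =>
      intro d
      simp only [List.foldl_cons]
      by_cases hb : f a b
      · simp only [hb, if_true]
        rw [ih, PySem.Dict.getD_modify_of_ne _ _ _ hk]
      · simp only [hb, Bool.false_eq_true, if_false]
        rw [ih]

-- the final desc table of A, as a value per key
theorem getD_desc_outer (f : String → String → Bool) (l : List String) :
    ∀ (L : List String) (d : PySem.Dict String (PySem.Set String)) (a : String),
      (L.foldl (fun d a' => l.foldl (fun d b => if f a' b then d.modify a' PySem.Set.empty (fun s => PySem.Set.add s b) else d) d) d).getD a PySem.Set.empty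
      = if a ∈ L then PySem.Set.update (d.getD a PySem.Set.empty) (l.filter (f a)) else d.getD a PySem.Set.empty := by
  intro L
  induction L with
  | nil => intro d a; simp
  | cons a' L ih =>
      intro d a
      simp only [List.foldl_cons]
      rw [ih]
      by_cases ha : a = a'
      · subst ha
        rw [getD_desc_inner_self]
        by_cases haL : a ∈ L
        · simp only [haL, if_true, List.mem_cons, true_or]
          exact set_update_absorb _ _ (fun x hx => (PySem.Set.mem_update _ _ _).mpr (Or.inr hx))
        · simp [haL]
      · rw [getD_desc_inner_other f a' a ha]
        simp [List.mem_cons, ha]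

theorem getD_init_empty : ∀ (l : List String) (d : PySem.Dict String (PySem.Set String)) (k : String),
    d.getD k PySem.Set.empty = PySem.Set.empty →
    (l.foldl (fun d n => d.insert n PySem.Set.empty) d).getD k PySem.Set.empty = PySem.Set.empty := by
  intro l
  induction l with
  | nil => intro d k h; exact h
  | cons n l ih =>
      intro d k h
      simp only [List.foldl_cons]
      refine ih _ k ?_
      rw [PySem.Dict.getD_insert]
      split
      · rfl
      · exact h

theorem desc_char (f : String → String → Bool) (nodes : List String) (a : String) :
    ((nodes.foldl (fun d a' => nodes.foldl (fun d b => if f a' b then d.modify a' PySem.Set.empty (fun s => PySem.Set.add s b) else d) d)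
        (pvInit nodes))).getD a PySem.Set.empty
      = if a ∈ nodes then PySem.Set.ofList (nodes.filter (f a)) else PySem.Set.empty := by
  rw [getD_desc_outer]
  have h0 : (pvInit nodes).getD a PySem.Set.empty = PySem.Set.empty :=
    getD_init_empty nodes PySem.Dict.empty a (by rw [PySem.Dict.getD_empty])
  rw [h0]
  by_cases ha : a ∈ nodes
  · simp only [ha, if_true]
    exact PySem.Set.update_empty _
  · simp [ha]

-- anc value view for A's loop
theorem getD_ancA (f : String → String → Bool) (l : List String) :
    ∀ (L : List String) (d : PySem.Dict String (PySem.Set String)) (k : String),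
      (L.foldl (fun d a => l.foldl (fun d b => if f a b then d.modify b PySem.Set.empty (fun s => PySem.Set.add s a) else d) d) d).getD k PySem.Set.empty
      = L.foldl (fun s a => if k ∈ l.filter (f a) then PySem.Set.add s a else s) (d.getD k PySem.Set.empty) := by
  intro L
  induction L with
  | nil => intro d k; rfl
  | cons a L ih =>
      intro d k
      simp only [List.foldl_cons]
      rw [ih, PySem.List.foldl_if_eq_foldl_filter, getD_foldl_modify_add]

-- keys are untouched by loops that only modify keys already present
theorem keys_foldl_modify_mem {β : Type} (key : β → String) (g : β → PySem.Set String → PySem.Set String) :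
    ∀ (l : List β) (d : PySem.Dict String (PySem.Set String)),
      (∀ b ∈ l, key b ∈ d.keys) →
      (l.foldl (fun d b => d.modify (key b) PySem.Set.empty (g b)) d).keys = d.keys := by
  intro l
  induction l with
  | nil => intro d _; rfl
  | cons b l ih =>
      intro d h
      simp only [List.foldl_cons]
      have hk : (d.modify (key b) PySem.Set.empty (g b)).keys = d.keys := by
        rw [PySem.Dict.keys_modify, PySem.Dict.keys_insert_of_contains]
        exact (PySem.Dict.contains_iff_mem_keys _ _).mpr (h b (by simp))
      have h2 : ∀ b' ∈ l, key b' ∈ (d.modify (key b) PySem.Set.empty (g b)).keys := by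
        rw [hk]; exact fun b' hb' => h b' (by simp [hb'])
      rw [ih _ h2, hk]

theorem keys_ancA (f : String → String → Bool) (l : List String) :
    ∀ (L : List String) (d : PySem.Dict String (PySem.Set String)),
      (∀ n ∈ l, n ∈ d.keys) →
      (L.foldl (fun d a => l.foldl (fun d b => if f a b then d.modify b PySem.Set.empty (fun s => PySem.Set.add s a) else d) d) d).keys = d.keys := by
  intro L
  induction L with
  | nil => intro d _; rfl
  | cons a L ih =>
      intro d h
      simp only [List.foldl_cons]
      have hk : (l.foldl (fun d b => if f a b then d.modify b PySem.Set.empty (fun s => PySem.Set.add s a) else d) d).keys = d.keys := by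
        rw [PySem.List.foldl_if_eq_foldl_filter]
        exact keys_foldl_modify_mem (fun b => b) (fun _ s => PySem.Set.add s a) _ d
          (fun b hb => h b (List.mem_of_mem_filter hb))
      have h2 := fun n hn => (hk.symm ▸ h n hn :)
      rw [ih _ h2, hk]

theorem keys_descA (f : String → String → Bool) (l : List String) :
    ∀ (L : List String) (d : PySem.Dict String (PySem.Set String)),
      (∀ n ∈ L, n ∈ d.keys) →
      (L.foldl (fun d a => l.foldl (fun d b => if f a b then d.modify a PySem.Set.empty (fun s => PySem.Set.add s b) else d) d) d).keys = d.keys := by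
  intro L
  induction L with
  | nil => intro d _; rfl
  | cons a L ih =>
      intro d h
      simp only [List.foldl_cons]
      have hk : (l.foldl (fun d b => if f a b then d.modify a PySem.Set.empty (fun s => PySem.Set.add s b) else d) d).keys = d.keys := by
        rw [PySem.List.foldl_if_eq_foldl_filter]
        exact keys_foldl_modify_mem (fun _ => a) (fun b s => PySem.Set.add s b) _ d
          (fun _ _ => h a (by simp))
      have h2 : ∀ n ∈ L, n ∈ (l.foldl (fun d b => if f a b then d.modify a PySem.Set.empty (fun s => PySem.Set.add s b) else d) d).keys := by
        rw [hk]; exact fun n hn => h n (by simp [hn])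
      rw [ih _ h2, hk]

theorem init_keys (nodes : List String) : (pvInit nodes).keys = PySem.Set.ofList nodes := by
  unfold pvInit
  have h := PySem.Dict.keys_foldl_insert (l := nodes)
    (f := fun (_ : PySem.Dict String (PySem.Set String)) (_ : String) => PySem.Set.empty)
    (d := PySem.Dict.empty)
  exact h.trans (by rw [PySem.Dict.keys_empty]; rfl)

-- extensionality for dicts with Nodup keys: equal keys and equal values-by-key give equal dicts
theorem items_char : ∀ (l : List (String × PySem.Set String)),
    (l.map Prod.fst).Nodup →
    l = (l.map Prod.fst).map (fun k => (k, (PySem.Dict.mk l).getD k PySem.Set.empty)) := by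
  intro l
  induction l with
  | nil => intro _; rfl
  | cons p l ih =>
      obtain ⟨k, v⟩ := p
      intro h
      simp only [List.map_cons] at h ⊢
      rw [List.nodup_cons] at h
      obtain ⟨hk, hn⟩ := h
      congr 1
      · simp [PySem.Dict.getD_eq_get?_getD, PySem.Dict.get?_mk_cons]
      · conv_lhs => rw [ih hn]
        apply List.map_congr_left
        intro x hx
        have hxk : ¬ (k == x) = true := by
          simp only [beq_iff_eq]
          intro e; exact hk (e ▸ hx)
        simp [PySem.Dict.getD_eq_get?_getD, PySem.Dict.get?_mk_cons, hxk]

theorem dict_ext_getD (d d' : PySem.Dict String (PySem.Set String))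
    (hk : d.keys = d'.keys) (hn : d.keys.Nodup)
    (hv : ∀ k, d.getD k PySem.Set.empty = d'.getD k PySem.Set.empty) : d = d' := by
  apply PySem.Dict.ext
  have hn1 : (d.items.map Prod.fst).Nodup := hn
  have hnk : d'.keys.Nodup := hk ▸ hn
  have hn2 : (d'.items.map Prod.fst).Nodup := hnk
  calc d.items
      = (d.items.map Prod.fst).map (fun k => (k, d.getD k PySem.Set.empty)) := items_char d.items hn1
    _ = (d'.items.map Prod.fst).map (fun k => (k, d'.getD k PySem.Set.empty)) := by
        rw [show d.items.map Prod.fst = d'.items.map Prod.fst from hk]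
        exact List.map_congr_left (fun x _ => by rw [hv x])
    _ = d'.items := (items_char d'.items hn2).symm

-- ===== B-side lemmas =====

-- progressive per-key filtering equals one filter by the conjunction of all key tests
theorem filter_chain (p : String → String → Bool) :
    ∀ (ks : List String) (l : List String),
      ks.foldl (fun cand k => cand.filter (p k)) l
      = l.filter (fun b => ks.all (fun k => p k b)) := by
  intro ks
  induction ks with
  | nil => intro l; simp
  | cons k ks ih =>
      intro l
      simp only [List.foldl_cons]
      rw [ih, List.filter_filter]
      refine List.filter_congr ?_
      intro b _
      simp [List.all_cons, Bool.and_comm]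

-- value view of a fold of inserts keyed by the element itself, value a function of the key
theorem getD_insert_fold (v : String → PySem.Set String) :
    ∀ (L : List String) (d : PySem.Dict String (PySem.Set String)) (k : String),
      (L.foldl (fun d a => d.insert a (v a)) d).getD k PySem.Set.empty
      = if k ∈ L then v k else d.getD k PySem.Set.empty := by
  intro L
  induction L with
  | nil => intro d k; simp
  | cons a L ih =>
      intro d k
      simp only [List.foldl_cons]
      rw [ih]
      by_cases hkL : k ∈ L
      · simp [hkL]
      · rw [PySem.Dict.getD_insert]
        by_cases hka : k = a
        · simp [hka]
        · simp [hka, hkL, List.mem_cons]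

theorem keys_insert_fold (v : String → PySem.Set String) (L : List String) :
    (L.foldl (fun d a => d.insert a (v a)) PySem.Dict.empty).keys = PySem.Set.ofList L := by
  have h := PySem.Dict.keys_foldl_insert (l := L)
    (f := fun (_ : PySem.Dict String (PySem.Set String)) (a : String) => v a)
    (d := PySem.Dict.empty)
  exact h.trans (by rw [PySem.Dict.keys_empty]; rfl)

-- A's desc table equals B's desc table
theorem desc_eq (f : String → String → Bool) (nodes : List String) :
    (nodes.foldl (fun d a => nodes.foldl (fun d b => if f a b then d.modify a PySem.Set.empty (fun s => PySem.Set.add s b) else d) d) (pvInit nodes))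
    = (nodes.foldl (fun d a => d.insert a (PySem.Set.ofList (nodes.filter (f a)))) PySem.Dict.empty) := by
  apply dict_ext_getD
  · rw [keys_descA f nodes nodes (pvInit nodes)
        (fun n hn => by rw [init_keys]; exact (PySem.Set.mem_ofList _ _).mpr hn),
      init_keys, keys_insert_fold]
  · rw [keys_descA f nodes nodes (pvInit nodes)
        (fun n hn => by rw [init_keys]; exact (PySem.Set.mem_ofList _ _).mpr hn), init_keys]
    exact PySem.Set.nodup_ofList nodes
  · intro k
    rw [desc_char f nodes k, getD_insert_fold]
    by_cases hk : k ∈ nodes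
    · simp [hk]
    · simp [hk]

-- A's anc table equals B's anc table
theorem anc_eq (f : String → String → Bool) (nodes : List String) :
    (nodes.foldl (fun d a => nodes.foldl (fun d b => if f a b then d.modify b PySem.Set.empty (fun s => PySem.Set.add s a) else d) d) (pvInit nodes))
    = (nodes.foldl (fun d b => d.insert b (PySem.Set.ofList (nodes.filter (fun a => f a b)))) PySem.Dict.empty) := by
  have hmem : ∀ n ∈ nodes, n ∈ (pvInit nodes).keys := by
    intro n hn; rw [init_keys]; exact (PySem.Set.mem_ofList _ _).mpr hn
  apply dict_ext_getD
  · rw [keys_ancA f nodes nodes (pvInit nodes) hmem, init_keys, keys_insert_fold]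
  · rw [keys_ancA f nodes nodes (pvInit nodes) hmem, init_keys]
    exact PySem.Set.nodup_ofList nodes
  · intro k
    rw [getD_ancA f nodes nodes (pvInit nodes) k, getD_insert_fold]
    have h0 : (pvInit nodes).getD k PySem.Set.empty = PySem.Set.empty :=
      getD_init_empty nodes PySem.Dict.empty k (by rw [PySem.Dict.getD_empty])
    rw [h0]
    by_cases hk : k ∈ nodes
    · simp only [hk, if_true]
      have hcond : ∀ a : String, (k ∈ nodes.filter (f a)) ↔ (f a k = true) := by
        intro a; simp [List.mem_filter, hk]
      calc nodes.foldl (fun s a => if k ∈ nodes.filter (f a) then PySem.Set.add s a else s) PySem.Set.empty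
          = nodes.foldl (fun s a => if f a k then PySem.Set.add s a else s) PySem.Set.empty := by
            refine PySem.List.foldl_congr_mem _ _ _ _ ?_
            intro s a _
            by_cases hfa : f a k
            · rw [if_pos ((hcond a).mpr hfa), if_pos hfa]
            · rw [if_neg (fun h => hfa ((hcond a).mp h)), if_neg hfa]
        _ = (nodes.filter (fun a => f a k)).foldl (fun s a => PySem.Set.add s a) PySem.Set.empty :=
            PySem.List.foldl_if_eq_foldl_filter _ _ _ _
        _ = PySem.Set.ofList (nodes.filter (fun a => f a k)) :=
            PySem.Set.update_empty _
    · have hfalse : ∀ a : String, ¬ (k ∈ nodes.filter (f a)) := by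
        intro a h; exact hk (List.mem_of_mem_filter h)
      simp only [hk, if_false]
      have hconst : ∀ (L : List String) (s : PySem.Set String),
          (∀ a ∈ L, ¬ (k ∈ nodes.filter (f a))) →
          L.foldl (fun s a => if k ∈ nodes.filter (f a) then PySem.Set.add s a else s) s = s := by
        intro L
        induction L with
        | nil => intro s _; rfl
        | cons a L ihL =>
            intro s h
            simp only [List.foldl_cons, if_neg (h a (by simp))]
            exact ihL s (fun a' ha' => h a' (by simp [ha']))
      rw [hconst nodes PySem.Set.empty (fun a _ => hfalse a), PySem.Dict.getD_empty]

theorem main_eq (nodes : List String) (vectors : List (String × List (String × Int))) (keys : List String) :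
    closures nodes vectors keys = closures_alt nodes vectors keys := by
  simp only [closures, closures_alt]
  rw [split_outer (pvF vectors keys) nodes nodes (pvInit nodes, pvInit nodes)]
  have hb : ∀ a : String,
      (keys.foldl (fun cand k => cand.filter (fun b => decide ((pvVec vectors a).getD k 0 ≤ (pvVec vectors b).getD k 0))) nodes)
      = nodes.filter (pvF vectors keys a) := by
    intro a
    rw [filter_chain (fun k b => decide ((pvVec vectors a).getD k 0 ≤ (pvVec vectors b).getD k 0)) keys nodes]
    rfl
  have hb2 : ∀ b : String,
      (keys.foldl (fun cand k => cand.filter (fun a => decide ((pvVec vectors a).getD k 0 ≤ (pvVec vectors b).getD k 0))) nodes)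
      = nodes.filter (fun a => pvF vectors keys a b) := by
    intro b
    rw [filter_chain (fun k a => decide ((pvVec vectors a).getD k 0 ≤ (pvVec vectors b).getD k 0)) keys nodes]
    rfl
  simp only [hb, hb2]
  rw [anc_eq (pvF vectors keys) nodes, desc_eq (pvF vectors keys) nodes]

-- ===== VERDICT (by name: the statement is the Claim_ definition above) =====
theorem closures_spec : Claim_equal_closures := by
  intro nodes vectors keys _ _
  unfold Spec_closures
  exact main_eq nodes vectors keys
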